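-- pv_equiv track=rewrite | github.com/jorgegr1707/Tarea6y7_NQueens | Genetics_NQueenProblem.py | get_matrix_solution
-- ===== SOURCE A (Python) =====
-- def get_matrix_solution(solution):
--     matrix = []
--     len_sol = len(solution)
--     for i in range(len_sol):
--         row = []
--         for j in range(len_sol): #row
--             if (i != solution[j]):
--                 row.append(0)
--             else:
--                 row.append(1)
--         matrix.append(row)
--     return matrix
-- ===== SOURCE B (Python) =====
-- def get_matrix_solution(solution):
--     n = len(solution)
--     matrix = [[0] * n for _ in range(n)]
--     for j, v in enumerate(solution):
--         if 0 <= v < n: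
--             matrix[v][j] = 1
--     return matrix
-- ===== Notes on version B (the rewrite author's own statement) =====
-- stated objective: simpler
-- what changed: B replaces A's per-cell comparison over all n^2 (i,j) pairs by zero-initializing the n x n matrix and one sparse pass over the columns that sets matrix[solution[j]][j] = 1 for each in-range value (out-of-range values place no queen, exactly as in A).
import Mathlib
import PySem

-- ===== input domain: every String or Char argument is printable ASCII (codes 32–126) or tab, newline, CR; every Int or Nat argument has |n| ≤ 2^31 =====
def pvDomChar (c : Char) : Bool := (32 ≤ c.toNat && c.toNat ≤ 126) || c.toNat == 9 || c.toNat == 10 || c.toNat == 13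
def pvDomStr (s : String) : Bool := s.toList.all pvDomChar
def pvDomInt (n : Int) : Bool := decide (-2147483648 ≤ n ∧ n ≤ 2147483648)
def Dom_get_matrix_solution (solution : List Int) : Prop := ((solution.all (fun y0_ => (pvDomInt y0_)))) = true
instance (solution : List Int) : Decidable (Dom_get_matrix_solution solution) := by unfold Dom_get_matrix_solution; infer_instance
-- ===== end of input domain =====

-- B builds the board by zero-initializing an n×n matrix and sparsely setting matrix[solution[j]][j] = 1
-- for each in-range value, instead of A's per-cell comparison over all (i, j) pairs (objective: simpler).

-- ===== PORT A =====
-- solution[j] with j always in range(len(solution)): pyGetD is exact here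
def get_matrix_solution (solution : List Int) : List (List Int) :=
  let len_sol : Int := solution.length
  (PySem.List.pyRange 0 len_sol 1).foldl (fun matrix i =>
    matrix ++ [(PySem.List.pyRange 0 len_sol 1).foldl (fun row j =>
      row ++ [if i ≠ PySem.List.pyGetD solution j 0 then (0 : Int) else 1]) []]) []

-- ===== PORT B =====
-- matrix[v][j] = 1 is reached only under the guard 0 ≤ v < n, so `.toNat` on both indices is exact
def get_matrix_solution_alt (solution : List Int) : List (List Int) :=
  let n := solution.length
  let matrix := (List.range n).map (fun _ => List.replicate n (0 : Int))
  (PySem.List.enumerate solution).foldl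
    (fun m p => if 0 ≤ p.2 ∧ p.2 < (n : Int)
      then m.modify p.2.toNat (fun row => row.set p.1.toNat 1) else m) matrix

-- ===== PRECONDITION & SPEC =====
def Spec_get_matrix_solution (solution : List Int) (out : List (List Int)) : Prop :=
  out = get_matrix_solution_alt solution
instance (solution : List Int) (out : List (List Int)) : Decidable (Spec_get_matrix_solution solution out) := by
  unfold Spec_get_matrix_solution; infer_instance

-- ===== CLAIM (what is proved, stated in full; the proofs are below) =====
def Claim_equal_get_matrix_solution : Prop := ∀ (solution : List Int), Dom_get_matrix_solution solution → Spec_get_matrix_solution solution (get_matrix_solution solution)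

-- ===== LEMMAS AND PROOFS =====

-- the fold step of port B
def pvStep (n : Nat) (m : List (List Int)) (p : Int × Int) : List (List Int) :=
  if 0 ≤ p.2 ∧ p.2 < (n : Int)
    then m.modify p.2.toNat (fun row => row.set p.1.toNat 1) else m

-- one cell of a matrix, as an option
def pvEntry (m : List (List Int)) (i j : Nat) : Option Int :=
  m[i]?.bind (fun row => row[j]?)

lemma pvStep_length (n : Nat) (m : List (List Int)) (p : Int × Int) :
    (pvStep n m p).length = m.length := by
  rw [pvStep]; split <;> simp

lemma pvStep_rows (n : Nat) (m : List (List Int)) (p : Int × Int)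
    (h : ∀ (k : Nat) (row : List Int), m[k]? = some row → row.length = n)
    (k : Nat) (row : List Int) (hk : (pvStep n m p)[k]? = some row) : row.length = n := by
  rw [pvStep] at hk
  split at hk
  · rw [List.getElem?_modify] at hk
    rcases hm : m[k]? with _ | r
    · simp [hm] at hk
    · rw [hm] at hk
      simp only [Option.map_eq_map, Option.map_some, Option.some.injEq] at hk
      have hr := h k r hm
      subst hk
      split
      · simp [hr]
      · exact hr
  · exact h k row hk

lemma pvFold_length (n : Nat) (ps : List (Int × Int)) (m : List (List Int)) :
    (ps.foldl (pvStep n) m).length = m.length := by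
  induction ps generalizing m with
  | nil => rfl
  | cons p ps ih => simp [List.foldl_cons, ih, pvStep_length]

lemma pvFold_rows (n : Nat) (ps : List (Int × Int)) (m : List (List Int))
    (h : ∀ (k : Nat) (row : List Int), m[k]? = some row → row.length = n)
    (k : Nat) (row : List Int) (hk : (ps.foldl (pvStep n) m)[k]? = some row) : row.length = n := by
  induction ps generalizing m with
  | nil => exact h k row hk
  | cons p ps ih => exact ih (pvStep n m p) (pvStep_rows n m p h) hk

lemma pvEntry_fold (n : Nat) (ps : List (Int × Int)) (m : List (List Int)) (i j : Nat)
    (hlen : m.length = n)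
    (hrows : ∀ (k : Nat) (row : List Int), m[k]? = some row → row.length = n)
    (hi : i < n) (hj : j < n) :
    pvEntry (ps.foldl (pvStep n) m) i j
      = if ∃ p ∈ ps, (0 ≤ p.2 ∧ p.2 < (n : Int)) ∧ p.2.toNat = i ∧ p.1.toNat = j
        then some 1 else pvEntry m i j := by
  induction ps generalizing m with
  | nil => simp
  | cons p ps ih =>
    have hlen' : (pvStep n m p).length = n := by rw [pvStep_length]; exact hlen
    have hrows' := pvStep_rows n m p hrows
    have hrec := ih (pvStep n m p) hlen' hrows'
    obtain ⟨row, hrow⟩ : ∃ row, m[i]? = some row := by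
      rcases hm : m[i]? with _ | r
      · rw [List.getElem?_eq_none_iff] at hm; omega
      · exact ⟨r, rfl⟩
    have hrlen : row.length = n := hrows i row hrow
    have hstep : pvEntry (pvStep n m p) i j
        = if (0 ≤ p.2 ∧ p.2 < (n : Int)) ∧ p.2.toNat = i ∧ p.1.toNat = j
          then some 1 else pvEntry m i j := by
      by_cases hg : 0 ≤ p.2 ∧ p.2 < (n : Int)
      · rw [pvStep, if_pos hg, pvEntry, List.getElem?_modify, hrow]
        by_cases hpi : p.2.toNat = i
        · simp only [hpi, Option.bind_some, pvEntry, hrow]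
          by_cases hpj : p.1.toNat = j
          · simp [hpj, hrlen, hj, hg]
          · simp [hpj]
        · simp [hpi, pvEntry, hrow]
      · rw [pvStep, if_neg hg]
        simp [hg]
    rw [List.foldl_cons, hrec, hstep]
    by_cases hmem : ∃ q ∈ ps, (0 ≤ q.2 ∧ q.2 < (n : Int)) ∧ q.2.toNat = i ∧ q.1.toNat = j
    · simp [hmem]
    · by_cases hpij : (0 ≤ p.2 ∧ p.2 < (n : Int)) ∧ p.2.toNat = i ∧ p.1.toNat = j
      · simp [hmem, hpij]
      · simp [hmem, hpij]

-- port A as a double map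
lemma pvA_eq_map (solution : List Int) :
    get_matrix_solution solution
      = (PySem.List.pyRange 0 solution.length 1).map (fun i =>
          (PySem.List.pyRange 0 solution.length 1).map (fun j =>
            if i ≠ PySem.List.pyGetD solution j 0 then (0 : Int) else 1)) := by
  simp only [get_matrix_solution, PySem.List.foldl_append_singleton_eq_map, List.nil_append]

lemma pvB_eq_fold (solution : List Int) :
    get_matrix_solution_alt solution
      = (PySem.List.enumerate solution).foldl (pvStep solution.length)
          ((List.range solution.length).map (fun _ => List.replicate solution.length (0 : Int))) := rfl

-- ===== VERDICT (by name: the statement is the Claim_ definition above) =====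
theorem get_matrix_solution_spec : Claim_equal_get_matrix_solution := by
  intro solution _
  unfold Spec_get_matrix_solution
  have hm0len : ((List.range solution.length).map
      (fun _ => List.replicate solution.length (0 : Int))).length = solution.length := by simp
  have hm0rows : ∀ (k : Nat) (row : List Int),
      ((List.range solution.length).map
        (fun _ => List.replicate solution.length (0 : Int)))[k]? = some row →
      row.length = solution.length := by
    intro k row hk
    rw [List.getElem?_map] at hk
    rcases hk' : (List.range solution.length)[k]? with _ | r
    · rw [hk'] at hk; simp at hk
    · rw [hk'] at hk
      simp only [Option.map_some, Option.some.injEq] at hk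
      subst hk; simp
  have hBlen : (get_matrix_solution_alt solution).length = solution.length := by
    rw [pvB_eq_fold, pvFold_length, hm0len]
  have hBrows : ∀ (k : Nat) (row : List Int),
      (get_matrix_solution_alt solution)[k]? = some row → row.length = solution.length := by
    rw [pvB_eq_fold]; exact pvFold_rows solution.length _ _ hm0rows
  rw [pvA_eq_map]
  apply List.ext_getElem
  · simp [PySem.List.length_pyRange_one, hBlen]
  · intro i hiA hiB
    have hi : i < solution.length := by omega
    obtain ⟨row, hrow⟩ : ∃ row, (get_matrix_solution_alt solution)[i]? = some row := by
      rcases hB : (get_matrix_solution_alt solution)[i]? with _ | r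
      · rw [List.getElem?_eq_none_iff] at hB; omega
      · exact ⟨r, rfl⟩
    have hBi : (get_matrix_solution_alt solution)[i] = row := by
      have h2 := List.getElem?_eq_getElem hiB
      rw [hrow] at h2
      exact (Option.some.injEq _ _).mp h2.symm
    have hrlen : row.length = solution.length := hBrows i row hrow
    rw [hBi]
    apply List.ext_getElem
    · simp [PySem.List.length_pyRange_one, hrlen]
    · intro j hjA hjB
      have hj : j < solution.length := by omega
      have hcond : (∃ p ∈ PySem.List.enumerate solution 0,
            (0 ≤ p.2 ∧ p.2 < (solution.length : Int)) ∧ p.2.toNat = i ∧ p.1.toNat = j)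
          ↔ solution[j]'hj = (i : Int) := by
        constructor
        · rintro ⟨p, hp, hg, h2, h1⟩
          rw [PySem.List.mem_enumerate_iff] at hp
          obtain ⟨k, hk, rfl⟩ := hp
          simp only [zero_add, Int.toNat_natCast] at h1 h2
          subst h1
          omega
        · intro h
          have hmem : ((j : Int), solution[j]'hj) ∈ PySem.List.enumerate solution 0 := by
            rw [PySem.List.mem_enumerate_iff]
            exact ⟨j, hj, by simp⟩
          refine ⟨((j : Int), solution[j]'hj), hmem, ?_, by simp [h], by simp⟩
          constructor <;> omega
      have hent : pvEntry (get_matrix_solution_alt solution) i j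
          = if ∃ p ∈ PySem.List.enumerate solution 0,
              (0 ≤ p.2 ∧ p.2 < (solution.length : Int)) ∧ p.2.toNat = i ∧ p.1.toNat = j
            then some 1 else some 0 := by
        rw [pvB_eq_fold,
          pvEntry_fold solution.length _ _ i j hm0len hm0rows hi hj]
        congr 1
        simp [pvEntry, hi, hj]
      have hBij : row[j]'hjB = if solution[j]'hj = (i : Int) then 1 else 0 := by
        have h3 : pvEntry (get_matrix_solution_alt solution) i j = some (row[j]'hjB) := by
          simp [pvEntry, hrow, List.getElem?_eq_getElem hjB]
        rw [hent] at h3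
        by_cases hc : ∃ p ∈ PySem.List.enumerate solution 0,
            (0 ≤ p.2 ∧ p.2 < (solution.length : Int)) ∧ p.2.toNat = i ∧ p.1.toNat = j
        · rw [if_pos hc] at h3
          rw [if_pos (hcond.mp hc)]
          exact ((Option.some.injEq _ _).mp h3).symm
        · rw [if_neg hc] at h3
          rw [if_neg (fun h => hc (hcond.mpr h))]
          exact ((Option.some.injEq _ _).mp h3).symm
      simp only [List.getElem_map, PySem.List.getElem_pyRange_one, zero_add,
        PySem.List.pyGetD_natCast]
      rw [hBij]
      have hget : solution.getD j 0 = solution[j]'hj := List.getD_eq_getElem solution 0 hj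
      rw [hget]
      by_cases h : solution[j]'hj = (i : Int)
      · simp [h]
      · simp [h, Ne.symm h]
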